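-- pv_equiv track=rewrite | github.com/fedora-infra/statusfpo | util_functions.py | getGlobalStatus
-- ===== SOURCE A (Python) =====
-- def getGlobalStatus(statuses):
--     global_status = 0    # 0 = ok, 1 = scheduled, 2 = minor, 3 = major
--     for service in statuses.keys():
--         status = statuses[service]['status']
--         if status == 'scheduled' and global_status < 1:
--             global_status = 1
--         elif status == 'minor' and global_status < 2:
--             global_status = 2
--         elif status == 'major' and global_status < 3:
--             global_status = 3
--     if global_status == 0:
--         return 'good'
--     elif global_status == 1:
--         return 'scheduled'
--     elif global_status == 2:
--         return 'minor'
--     else: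
--         return 'major'
-- ===== SOURCE B (Python) =====
-- def getGlobalStatus(statuses):
--     vals = [statuses[s]['status'] for s in statuses]
--     for level in ('major', 'minor', 'scheduled'):
--         if level in vals:
--             return level
--     return 'good'
-- ===== Notes on version B (the rewrite author's own statement) =====
-- stated objective: simpler
-- what changed: Replaces the numeric-severity accumulator loop and the output if/elif chain with an early-exit search: extract all statuses once, then try each severity level from worst to mildest and return the first one present; no severity numbers or accumulator at all.
import Mathlib
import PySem

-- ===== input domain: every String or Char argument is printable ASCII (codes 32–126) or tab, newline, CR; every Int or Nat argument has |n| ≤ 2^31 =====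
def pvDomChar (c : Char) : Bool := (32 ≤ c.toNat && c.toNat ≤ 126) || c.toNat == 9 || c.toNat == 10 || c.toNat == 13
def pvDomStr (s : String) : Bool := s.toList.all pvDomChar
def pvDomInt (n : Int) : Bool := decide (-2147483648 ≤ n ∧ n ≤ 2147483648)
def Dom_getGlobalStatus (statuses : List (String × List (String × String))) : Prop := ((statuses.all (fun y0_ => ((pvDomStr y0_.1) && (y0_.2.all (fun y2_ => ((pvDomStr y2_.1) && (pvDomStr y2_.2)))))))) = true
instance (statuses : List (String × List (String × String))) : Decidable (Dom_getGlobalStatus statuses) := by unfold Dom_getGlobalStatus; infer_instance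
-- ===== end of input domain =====

-- B replaces A's numeric-severity accumulator loop and output if/elif chain with an
-- early-exit membership search from worst to mildest level; same cost, simpler.

-- ===== PORT A =====
-- A's loop: global_status accumulator updated by the if/elif chain; the `.getD ""`
-- totalizes the KeyError on a missing 'status' key, which Pre_ excludes.
def getGlobalStatus (statuses : List (String × List (String × String))) : String :=
  let gs : Int := statuses.foldl (fun g p =>
    let status := ((PySem.Dict.mk p.2).get? "status").getD ""
    if status == "scheduled" && g < 1 then 1
    else if status == "minor" && g < 2 then 2
    else if status == "major" && g < 3 then 3
    else g) 0
  if gs == 0 then "good"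
  else if gs == 1 then "scheduled"
  else if gs == 2 then "minor"
  else "major"

-- ===== PORT B =====
-- vals = [statuses[s]['status'] for s in statuses]; the `.getD ""` totalizes the
-- KeyError on a missing 'status' key, which Pre_ excludes.
def pvVals (statuses : List (String × List (String × String))) : List String :=
  statuses.map (fun p => ((PySem.Dict.mk p.2).get? "status").getD "")

-- the for-loop over ('major', 'minor', 'scheduled') with early return, unrolled
def getGlobalStatus_alt (statuses : List (String × List (String × String))) : String :=
  let vals := pvVals statuses
  if vals.contains "major" then "major"
  else if vals.contains "minor" then "minor"
  else if vals.contains "scheduled" then "scheduled"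
  else "good"

-- ===== PRECONDITION & SPEC =====
-- Pre_ excludes exactly the inputs where an inner dict has no 'status' key, on which
-- the Python A (and B) raise KeyError.
def Pre_getGlobalStatus (statuses : List (String × List (String × String))) : Prop :=
  ∀ p ∈ statuses, ((PySem.Dict.mk p.2).get? "status").isSome = true
instance (statuses : List (String × List (String × String))) : Decidable (Pre_getGlobalStatus statuses) := by unfold Pre_getGlobalStatus; infer_instance

def pvWitness_getGlobalStatus : (List (String × List (String × String))) :=
  [("web", [("status", "minor")]), ("mail", [("status", "good")])]

def Spec_getGlobalStatus (statuses : List (String × List (String × String))) (out : String) : Prop := out = getGlobalStatus_alt statuses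
instance (statuses : List (String × List (String × String))) (out : String) : Decidable (Spec_getGlobalStatus statuses out) := by unfold Spec_getGlobalStatus; infer_instance

-- ===== CLAIM (what is proved, stated in full; the proofs are below) =====
def Claim_equal_getGlobalStatus : Prop := ∀ (statuses : List (String × List (String × String))), Dom_getGlobalStatus statuses → Pre_getGlobalStatus statuses → Spec_getGlobalStatus statuses (getGlobalStatus statuses)

-- ===== LEMMAS AND PROOFS =====

-- the value B's if-chain picks from the extracted status list, as a number
def pvLevel (vals : List String) : Int :=
  if vals.contains "major" then 3
  else if vals.contains "minor" then 2
  else if vals.contains "scheduled" then 1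
  else 0

theorem pvLevel_bounds (vals : List String) : 0 ≤ pvLevel vals ∧ pvLevel vals ≤ 3 := by
  unfold pvLevel; split_ifs <;> norm_num

theorem pvLevel_cons (s : String) (t : List String) :
    pvLevel (s :: t) =
      max (if s = "scheduled" then 1 else if s = "minor" then 2
           else if s = "major" then 3 else 0) (pvLevel t) := by
  unfold pvLevel
  by_cases h1 : s = "scheduled" <;> by_cases h2 : s = "minor" <;>
    by_cases h3 : s = "major" <;>
    by_cases c1 : t.contains "major" <;> by_cases c2 : t.contains "minor" <;>
    by_cases c3 : t.contains "scheduled" <;>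
    simp_all [List.contains_cons, eq_comm] <;> norm_num

-- A's step as a max with the severity of the head status
theorem pvStep_eq_max (g : Int) (hg : 0 ≤ g) (s : String) :
    (if s == "scheduled" && g < 1 then (1:Int)
     else if s == "minor" && g < 2 then 2
     else if s == "major" && g < 3 then 3
     else g)
    = max g (if s = "scheduled" then 1 else if s = "minor" then 2
             else if s = "major" then 3 else 0) := by
  by_cases h1 : s = "scheduled" <;> by_cases h2 : s = "minor" <;>
    by_cases h3 : s = "major" <;>
    simp_all [max_def] <;> split_ifs <;> omega

-- fold invariant: A's fold from g equals max of g with the level of the extracted list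
theorem pvFold_eq (l : List (String × List (String × String))) :
    ∀ (g : Int), 0 ≤ g →
    l.foldl (fun g p =>
      let status := ((PySem.Dict.mk p.2).get? "status").getD ""
      if status == "scheduled" && g < 1 then (1:Int)
      else if status == "minor" && g < 2 then 2
      else if status == "major" && g < 3 then 3
      else g) g = max g (pvLevel (pvVals l)) := by
  induction l with
  | nil => intro g hg; simp [pvVals, pvLevel, max_def]; omega
  | cons p t ih =>
    intro g hg
    simp only [List.foldl_cons]
    rw [pvStep_eq_max g hg, ih _ (le_trans hg (le_max_left _ _))]
    simp only [pvVals, List.map_cons]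
    rw [pvLevel_cons, max_assoc]

-- ===== VERDICT (by name: the statement is the Claim_ definition above) =====
theorem getGlobalStatus_spec : Claim_equal_getGlobalStatus := by
  intro statuses _ _
  unfold Spec_getGlobalStatus getGlobalStatus
  simp only []
  rw [pvFold_eq statuses 0 le_rfl]
  have hb := pvLevel_bounds (pvVals statuses)
  unfold getGlobalStatus_alt pvLevel
  simp only []
  by_cases h1 : (pvVals statuses).contains "major" <;>
    by_cases h2 : (pvVals statuses).contains "minor" <;>
      by_cases h3 : (pvVals statuses).contains "scheduled" <;>
        simp_all [pvLevel, max_def]
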